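-- pv_equiv track=rewrite | github.com/KnightAsterial/sdg-ehr | dataset2text.py | convert_codes_to_text
-- ===== SOURCE A (Python) =====
-- def convert_codes_to_text(codes, diagnosis_dict, procedure_dict, medication_dict):
--     diagnoses = []
--     procedures = []
--     medications = []
--     for code in codes:
--         if code in diagnosis_dict:
--             diagnoses.append(diagnosis_dict[code])
--         elif code in procedure_dict:
--             procedures.append(procedure_dict[code])
--         elif code in medication_dict:
--             medications.append(medication_dict[code])
--     return diagnoses, procedures, medications
-- ===== SOURCE B (Python) =====
-- def convert_codes_to_text(codes, diagnosis_dict, procedure_dict, medication_dict):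
--     codes = list(codes)
--     diagnoses = [diagnosis_dict[c] for c in codes if c in diagnosis_dict]
--     procedures = [procedure_dict[c] for c in codes
--                   if c not in diagnosis_dict and c in procedure_dict]
--     medications = [medication_dict[c] for c in codes
--                    if c not in diagnosis_dict and c not in procedure_dict
--                    and c in medication_dict]
--     return diagnoses, procedures, medications
-- ===== Notes on version B (the rewrite author's own statement) =====
-- stated objective: alternative
-- what changed: Replaces A's single priority-chain loop maintaining three accumulators with three independent filtered comprehensions over the materialized code list, the negative membership tests reproducing the elif priority.
import Mathlib
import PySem

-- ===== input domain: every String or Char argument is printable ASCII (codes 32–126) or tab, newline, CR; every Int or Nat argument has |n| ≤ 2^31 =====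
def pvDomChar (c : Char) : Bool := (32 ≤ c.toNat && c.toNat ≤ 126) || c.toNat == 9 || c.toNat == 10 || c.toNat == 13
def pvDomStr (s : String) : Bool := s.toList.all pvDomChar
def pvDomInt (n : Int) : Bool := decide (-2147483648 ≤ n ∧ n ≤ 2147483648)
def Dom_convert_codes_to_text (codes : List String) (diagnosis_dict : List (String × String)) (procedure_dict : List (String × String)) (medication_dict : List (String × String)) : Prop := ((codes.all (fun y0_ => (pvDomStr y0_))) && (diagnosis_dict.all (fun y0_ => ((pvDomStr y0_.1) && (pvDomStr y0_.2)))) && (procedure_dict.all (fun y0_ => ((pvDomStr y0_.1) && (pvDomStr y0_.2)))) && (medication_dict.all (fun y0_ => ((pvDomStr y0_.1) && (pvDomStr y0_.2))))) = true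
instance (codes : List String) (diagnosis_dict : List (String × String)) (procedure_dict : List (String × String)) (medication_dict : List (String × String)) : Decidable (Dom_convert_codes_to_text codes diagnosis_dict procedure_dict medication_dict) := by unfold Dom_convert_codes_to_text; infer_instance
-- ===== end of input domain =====

-- B replaces A's single priority-chain loop with three independent filtered passes (alternative decomposition, same cost).

-- ===== PORT A =====
-- the for-loop: one pass, an if/elif/elif chain appending to one of three accumulators
def convert_codes_to_text (codes : List String) (diagnosis_dict : List (String × String)) (procedure_dict : List (String × String)) (medication_dict : List (String × String)) : List String × List String × List String :=
  codes.foldl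
    (fun acc code =>
      match (PySem.Dict.mk diagnosis_dict).get? code with
      | some v => (acc.1 ++ [v], acc.2.1, acc.2.2)
      | none =>
        match (PySem.Dict.mk procedure_dict).get? code with
        | some v => (acc.1, acc.2.1 ++ [v], acc.2.2)
        | none =>
          match (PySem.Dict.mk medication_dict).get? code with
          | some v => (acc.1, acc.2.1, acc.2.2 ++ [v])
          | none => acc)
    ([], [], [])

-- ===== PORT B =====
-- three filtered comprehensions; the negative membership tests encode the elif priority
def convert_codes_to_text_alt (codes : List String) (diagnosis_dict : List (String × String)) (procedure_dict : List (String × String)) (medication_dict : List (String × String)) : List String × List String × List String :=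
  let dd := PySem.Dict.mk diagnosis_dict
  let pd := PySem.Dict.mk procedure_dict
  let md := PySem.Dict.mk medication_dict
  ( codes.filterMap (fun c => if dd.contains c then dd.get? c else none)
  , codes.filterMap (fun c => if !dd.contains c && pd.contains c then pd.get? c else none)
  , codes.filterMap (fun c => if !dd.contains c && !pd.contains c && md.contains c then md.get? c else none) )

-- ===== PRECONDITION & SPEC =====
def Spec_convert_codes_to_text (codes : List String) (diagnosis_dict : List (String × String)) (procedure_dict : List (String × String)) (medication_dict : List (String × String)) (out : List String × List String × List String) : Prop := out = convert_codes_to_text_alt codes diagnosis_dict procedure_dict medication_dict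
instance (codes : List String) (diagnosis_dict : List (String × String)) (procedure_dict : List (String × String)) (medication_dict : List (String × String)) (out : List String × List String × List String) : Decidable (Spec_convert_codes_to_text codes diagnosis_dict procedure_dict medication_dict out) := by unfold Spec_convert_codes_to_text; infer_instance

-- ===== CLAIM (what is proved, stated in full; the proofs are below) =====
def Claim_equal_convert_codes_to_text : Prop := ∀ (codes : List String) (diagnosis_dict : List (String × String)) (procedure_dict : List (String × String)) (medication_dict : List (String × String)), Dom_convert_codes_to_text codes diagnosis_dict procedure_dict medication_dict → Spec_convert_codes_to_text codes diagnosis_dict procedure_dict medication_dict (convert_codes_to_text codes diagnosis_dict procedure_dict medication_dict)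

-- ===== LEMMAS AND PROOFS =====

theorem cctt_contains_eq_isSome {d : PySem.Dict String String} {c : String} :
    d.contains c = (d.get? c).isSome := by
  cases h : d.get? c with
  | none =>
    simp [(PySem.Dict.get?_eq_none_iff_contains d c).mp h]
  | some v =>
    simp only [Option.isSome_some]
    cases hcc : d.contains c with
    | true => rfl
    | false => simp [(PySem.Dict.get?_eq_none_iff_contains d c).mpr hcc] at h

theorem cctt_foldl_inv (codes : List String) (dd pd md : PySem.Dict String String)
    (a b c : List String) :
    codes.foldl
      (fun acc code =>
        match dd.get? code with
        | some v => (acc.1 ++ [v], acc.2.1, acc.2.2)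
        | none =>
          match pd.get? code with
          | some v => (acc.1, acc.2.1 ++ [v], acc.2.2)
          | none =>
            match md.get? code with
            | some v => (acc.1, acc.2.1, acc.2.2 ++ [v])
            | none => acc)
      (a, b, c)
    = ( a ++ codes.filterMap (fun x => if dd.contains x then dd.get? x else none)
      , b ++ codes.filterMap (fun x => if !dd.contains x && pd.contains x then pd.get? x else none)
      , c ++ codes.filterMap (fun x => if !dd.contains x && !pd.contains x && md.contains x then md.get? x else none) ) := by
  induction codes generalizing a b c with
  | nil => simp
  | cons hd tl ih =>
    simp only [List.foldl_cons, List.filterMap_cons]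
    rcases h1 : dd.get? hd with _ | v1
    · rcases h2 : pd.get? hd with _ | v2
      · rcases h3 : md.get? hd with _ | v3
        · simpa [cctt_contains_eq_isSome, h1, h2, h3] using ih a b c
        · simpa [cctt_contains_eq_isSome, h1, h2, h3] using ih a b (c ++ [v3])
      · simpa [cctt_contains_eq_isSome, h1, h2] using ih a (b ++ [v2]) c
    · simpa [cctt_contains_eq_isSome, h1] using ih (a ++ [v1]) b c

-- ===== VERDICT (by name: the statement is the Claim_ definition above) =====
theorem convert_codes_to_text_spec : Claim_equal_convert_codes_to_text := by
  intro codes dd pd md _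
  show _ = _
  unfold convert_codes_to_text convert_codes_to_text_alt
  simpa using cctt_foldl_inv codes (PySem.Dict.mk dd) (PySem.Dict.mk pd) (PySem.Dict.mk md) [] [] []
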